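-- pv_equiv track=rewrite | github.com/shellphish/artiphishell | pipelines/components/generic_c/symcts/mctsse/implementation/libfuzzer_stb_image_symcts/fuzzer/scripts/plot_successful_mutations.py | bucket_mutation_counts
-- ===== SOURCE A (Python) =====
-- from typing import List
--
-- def bucket_mutation_counts(mutations: List[str], parsed, nsteps=20):
--
--     # import ipdb; ipdb.set_trace()
--     res = []
--     for i in range(0, len(parsed), nsteps):
--         if i + nsteps > len(parsed):
--             # the last bucket is incomplete, let's not include it in the plot
--             continue
--         cur_accum = [0] * len(mutations)
--         for j, cur_results in enumerate(parsed[i:i+nsteps]):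
--             for mut_idx, mut in enumerate(mutations):
--                 cur_accum[mut_idx] += cur_results['successful_mutations'][mut]
--         res.append(cur_accum)
--     return res
-- ===== SOURCE B (Python) =====
-- from typing import List
--
-- def bucket_mutation_counts(mutations: List[str], parsed, nsteps=20):
--     # Single flat pass with a flush-on-boundary accumulator instead of
--     # slice-then-nested-loops per bucket.
--     if nsteps <= 0:
--         return []
--     ncomplete = len(parsed) // nsteps
--     res = []
--     acc = []
--     count = 0
--     for cur in parsed[:ncomplete * nsteps]:
--         if count == 0:
--             acc = [0] * len(mutations)
--         for k, mut in enumerate(mutations):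
--             acc[k] += cur['successful_mutations'][mut]
--         count += 1
--         if count == nsteps:
--             res.append(acc)
--             count = 0
--     return res
-- ===== Notes on version B (the rewrite author's own statement) =====
-- stated objective: alternative
-- what changed: replaces A's per-bucket range/slice with one flat pass over the complete-bucket prefix, maintaining a running accumulator that is flushed to the result at each bucket boundary
import Mathlib
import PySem

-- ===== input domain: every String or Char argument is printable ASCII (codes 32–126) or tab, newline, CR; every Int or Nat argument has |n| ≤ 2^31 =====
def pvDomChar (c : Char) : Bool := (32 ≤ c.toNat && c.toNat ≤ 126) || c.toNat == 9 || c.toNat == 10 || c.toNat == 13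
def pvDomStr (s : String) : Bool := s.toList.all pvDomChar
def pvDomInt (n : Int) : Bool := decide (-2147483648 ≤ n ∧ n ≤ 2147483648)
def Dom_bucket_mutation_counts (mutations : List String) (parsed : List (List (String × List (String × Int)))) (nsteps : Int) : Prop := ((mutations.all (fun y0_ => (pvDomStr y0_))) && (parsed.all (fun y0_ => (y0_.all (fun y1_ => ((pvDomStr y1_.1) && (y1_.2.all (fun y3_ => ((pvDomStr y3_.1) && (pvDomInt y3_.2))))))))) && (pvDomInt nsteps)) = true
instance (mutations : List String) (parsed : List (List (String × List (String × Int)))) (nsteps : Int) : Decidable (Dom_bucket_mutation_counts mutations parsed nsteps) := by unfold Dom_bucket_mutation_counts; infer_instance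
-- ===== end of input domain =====

-- B replaces A's per-bucket range/slice nesting with one flat pass over the complete-bucket
-- prefix, flushing a running accumulator at each bucket boundary (alternative decomposition).


-- ===== PORT A =====
-- cur_results['successful_mutations'][m_]; both lookups raise KeyError on a missing key in
-- Python — those inputs are excluded by Pre_, the port's getD defaults are never reached there.
def pvGetCountA (cur : List (String × List (String × Int))) (m_ : String) : Int :=
  (((List.lookup "successful_mutations" cur).getD []).lookup m_).getD 0

def bucket_mutation_counts (mutations : List String) (parsed : List (List (String × List (String × Int)))) (nsteps : Int) : List (List Int) :=
  (PySem.List.pyRange 0 parsed.length nsteps).foldl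
    (fun res i =>
      if (parsed.length : Int) < i + nsteps then res
      else
        res ++ [(PySem.List.slice parsed (some i) (some (i + nsteps))).foldl
          (fun cur_accum cur_results =>
            mutations.zipIdx.foldl
              (fun ca p => ca.set p.2 (ca.getD p.2 0 + pvGetCountA cur_results p.1)) cur_accum)
          (List.replicate mutations.length 0)])
    []

-- ===== PORT B =====
def pvGetCountB (cur : List (String × List (String × Int))) (m_ : String) : Int :=
  (((List.lookup "successful_mutations" cur).getD []).lookup m_).getD 0

def bucket_mutation_counts_alt (mutations : List String) (parsed : List (List (String × List (String × Int)))) (nsteps : Int) : List (List Int) :=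
  if nsteps ≤ 0 then []
  else
    let n := nsteps.toNat
    let ncomplete := parsed.length / n
    ((parsed.take (ncomplete * n)).foldl
      (fun (st : List (List Int) × List Int × Nat) cur =>
        let acc := if st.2.2 = 0 then List.replicate mutations.length (0 : Int) else st.2.1
        let acc := mutations.zipIdx.foldl
          (fun a p => a.set p.2 (a.getD p.2 0 + pvGetCountB cur p.1)) acc
        let count := st.2.2 + 1
        if count = n then (st.1 ++ [acc], acc, 0) else (st.1, acc, count))
      ([], [], 0)).1

-- ===== PRECONDITION & SPEC =====
-- Pre_ excludes exactly the inputs where the Python A raises: nsteps = 0 (ValueError from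
-- range) and a missing 'successful_mutations'/mutation key in an entry of a complete bucket
-- (KeyError); on every other input A returns normally.
def Pre_bucket_mutation_counts (mutations : List String) (parsed : List (List (String × List (String × Int)))) (nsteps : Int) : Prop :=
  nsteps ≠ 0 ∧
  ∀ cur ∈ parsed.take (parsed.length / nsteps.toNat * nsteps.toNat),
    ∀ m_ ∈ mutations,
      (((List.lookup "successful_mutations" cur).getD []).lookup m_).isSome = true
instance (mutations : List String) (parsed : List (List (String × List (String × Int)))) (nsteps : Int) : Decidable (Pre_bucket_mutation_counts mutations parsed nsteps) := by unfold Pre_bucket_mutation_counts; infer_instance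

def pvWitness_bucket_mutation_counts : List String × (List (List (String × List (String × Int)))) × Int :=
  (["a"], [[("successful_mutations", [("a", 1)])], [("successful_mutations", [("a", 2)])]], 2)

def Spec_bucket_mutation_counts (mutations : List String) (parsed : List (List (String × List (String × Int)))) (nsteps : Int) (out : List (List Int)) : Prop := out = bucket_mutation_counts_alt mutations parsed nsteps
instance (mutations : List String) (parsed : List (List (String × List (String × Int)))) (nsteps : Int) (out : List (List Int)) : Decidable (Spec_bucket_mutation_counts mutations parsed nsteps out) := by unfold Spec_bucket_mutation_counts; infer_instance

-- ===== CLAIM (what is proved, stated in full; the proofs are below) =====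
def Claim_equal_bucket_mutation_counts : Prop := ∀ (mutations : List String) (parsed : List (List (String × List (String × Int)))) (nsteps : Int), Dom_bucket_mutation_counts mutations parsed nsteps → Pre_bucket_mutation_counts mutations parsed nsteps → Spec_bucket_mutation_counts mutations parsed nsteps (bucket_mutation_counts mutations parsed nsteps)

-- ===== LEMMAS AND PROOFS =====

-- Common vocabulary for both directions of the proof.
def pvAdd (mutations : List String) (ca : List Int) (cur : List (String × List (String × Int))) : List Int :=
  mutations.zipIdx.foldl (fun a p => a.set p.2 (a.getD p.2 0 + pvGetCountA cur p.1)) ca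

def pvCsum (mutations : List String) (chunk : List (List (String × List (String × Int)))) : List Int :=
  chunk.foldl (pvAdd mutations) (List.replicate mutations.length 0)

-- The common normal form: one row per complete bucket.
def pvSpecForm (mutations : List String) (parsed : List (List (String × List (String × Int)))) (n : Nat) : List (List Int) :=
  (List.range (parsed.length / n)).map (fun b => pvCsum mutations ((parsed.drop (b * n)).take n))

-- B's loop body as a named step function (definitionally the lambda in the port).
def pvStepB (mutations : List String) (n : Nat) (st : List (List Int) × List Int × Nat) (cur : List (String × List (String × Int))) : List (List Int) × List Int × Nat :=
  let acc := if st.2.2 = 0 then List.replicate mutations.length (0 : Int) else st.2.1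
  let acc := mutations.zipIdx.foldl (fun a p => a.set p.2 (a.getD p.2 0 + pvGetCountB cur p.1)) acc
  let count := st.2.2 + 1
  if count = n then (st.1 ++ [acc], acc, 0) else (st.1, acc, count)

-- Single steps of B's loop, by the counter's position.
theorem pvStep_zero (mutations : List String) (n : Nat) (res : List (List Int)) (acc : List Int) (c : List (String × List (String × Int))) :
    pvStepB mutations n (res, acc, 0) c =
      (if 0 + 1 = n then (res ++ [pvAdd mutations (List.replicate mutations.length 0) c], pvAdd mutations (List.replicate mutations.length 0) c, 0)
       else (res, pvAdd mutations (List.replicate mutations.length 0) c, 0 + 1)) := rfl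

theorem pvStep_flush (mutations : List String) (n : Nat) (res : List (List Int)) (acc : List Int) (count : Nat) (c : List (String × List (String × Int)))
    (h0 : count ≠ 0) (h : count + 1 = n) :
    pvStepB mutations n (res, acc, count) c = (res ++ [pvAdd mutations acc c], pvAdd mutations acc c, 0) := by
  unfold pvStepB pvAdd pvGetCountA pvGetCountB
  simp [h0, h]

theorem pvStep_go (mutations : List String) (n : Nat) (res : List (List Int)) (acc : List Int) (count : Nat) (c : List (String × List (String × Int)))
    (h0 : count ≠ 0) (h : count + 1 ≠ n) :
    pvStepB mutations n (res, acc, count) c = (res, pvAdd mutations acc c, count + 1) := by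
  unfold pvStepB pvAdd pvGetCountA pvGetCountB
  simp [h0, h]

-- Mid-chunk run: with 1 ≤ count the accumulator is not reset, and exactly when the chunk
-- ends the bucket, it is flushed and the counter returns to 0.
theorem pvH (mutations : List String) (n : Nat) :
    ∀ (rest : List (List (String × List (String × Int)))) (count : Nat) (acc : List Int) (res : List (List Int)),
      1 ≤ count → count + rest.length = n → 1 ≤ rest.length →
      rest.foldl (pvStepB mutations n) (res, acc, count) =
        (res ++ [rest.foldl (pvAdd mutations) acc], rest.foldl (pvAdd mutations) acc, 0) := by
  intro rest
  induction rest with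
  | nil => intro _ _ _ _ _ h; simp at h
  | cons c rest' ih =>
    intro count acc res hc hlen _
    simp only [List.length_cons] at hlen
    cases rest' with
    | nil =>
      simp only [List.length_nil] at hlen
      rw [List.foldl_cons, pvStep_flush mutations n res acc count c (by omega) (by omega)]
      simp
    | cons d rest'' =>
      rw [List.foldl_cons, pvStep_go mutations n res acc count c (by omega) (by simp at hlen; omega)]
      rw [ih (count + 1) (pvAdd mutations acc c) res (by omega) (by simp at hlen ⊢; omega) (by simp)]
      simp

-- A full chunk processed from a fresh boundary produces exactly its bucket sum.
theorem pvC (mutations : List String) (n : Nat) (chunk : List (List (String × List (String × Int)))) (res : List (List Int)) (acc : List Int)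
    (hn : 1 ≤ n) (hlen : chunk.length = n) :
    chunk.foldl (pvStepB mutations n) (res, acc, 0) =
      (res ++ [pvCsum mutations chunk], pvCsum mutations chunk, 0) := by
  cases chunk with
  | nil => simp at hlen; omega
  | cons c rest =>
    simp only [List.length_cons] at hlen
    rw [List.foldl_cons, pvStep_zero]
    by_cases h1 : (0 : Nat) + 1 = n
    · rw [if_pos h1]
      have hrest : rest = [] := by
        cases rest with
        | nil => rfl
        | cons _ _ => simp at hlen; omega
      subst hrest
      simp [pvCsum]
    · rw [if_neg h1]
      rw [pvH mutations n rest 1 _ res (by omega) (by omega) (by omega)]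
      simp [pvCsum]

-- Whole prefix of k complete chunks.
theorem pvE (mutations : List String) (n : Nat) (hn : 1 ≤ n) :
    ∀ (k : Nat) (xs : List (List (String × List (String × Int)))) (res : List (List Int)) (acc : List Int),
      k * n ≤ xs.length →
      ∃ acc', (xs.take (k * n)).foldl (pvStepB mutations n) (res, acc, 0) =
        (res ++ (List.range k).map (fun b => pvCsum mutations ((xs.drop (b * n)).take n)), acc', 0) := by
  intro k
  induction k with
  | zero => intro xs res acc _; exact ⟨acc, by simp⟩
  | succ k ih =>
    intro xs res acc hk
    have hsplit : (k + 1) * n = n + k * n := by ring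
    rw [hsplit, List.take_add, List.foldl_append]
    have hn_le : n ≤ xs.length := by rw [hsplit] at hk; omega
    have hlen1 : (xs.take n).length = n := by simp [List.length_take]; omega
    rw [pvC mutations n (xs.take n) res acc hn hlen1]
    obtain ⟨acc', hrec⟩ := ih (xs.drop n) (res ++ [pvCsum mutations (xs.take n)]) (pvCsum mutations (xs.take n))
      (by have hk' := hk; rw [hsplit] at hk'; rw [List.length_drop]; omega)
    refine ⟨acc', ?_⟩
    rw [hrec]
    have hmap : (List.range (k + 1)).map (fun b => pvCsum mutations ((xs.drop (b * n)).take n)) =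
        pvCsum mutations (xs.take n) ::
          (List.range k).map (fun b => pvCsum mutations (((xs.drop n).drop (b * n)).take n)) := by
      rw [List.range_succ_eq_map, List.map_cons, List.map_map]
      simp only [Nat.zero_mul, List.drop_zero]
      congr 1
      apply List.map_congr_left
      intro b _
      simp only [Function.comp_apply, List.drop_drop]
      rw [show b.succ * n = n + b * n from by rw [Nat.succ_mul, Nat.add_comm]]
    rw [hmap]
    simp

theorem pvB_eq_spec (mutations : List String) (parsed : List (List (String × List (String × Int)))) (nsteps : Int) (h : 0 < nsteps) :
    bucket_mutation_counts_alt mutations parsed nsteps = pvSpecForm mutations parsed nsteps.toNat := by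
  unfold bucket_mutation_counts_alt
  rw [if_neg (by omega)]
  obtain ⟨acc', hE⟩ := pvE mutations nsteps.toNat (by omega)
    (parsed.length / nsteps.toNat) parsed [] []
    (Nat.div_mul_le_self _ _)
  show (List.foldl (pvStepB mutations nsteps.toNat) ([], [], 0)
      (List.take (parsed.length / nsteps.toNat * nsteps.toNat) parsed)).1 =
    pvSpecForm mutations parsed nsteps.toNat
  rw [hE]
  simp [pvSpecForm]





-- A's bucket body (the slice-and-sum of one window), named for the proof.
def pvBucketA (mutations : List String) (parsed : List (List (String × List (String × Int)))) (nsteps i : Int) : List Int :=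
  (PySem.List.slice parsed (some i) (some (i + nsteps))).foldl
    (fun cur_accum cur_results =>
      mutations.zipIdx.foldl
        (fun ca p => ca.set p.2 (ca.getD p.2 0 + pvGetCountA cur_results p.1)) cur_accum)
    (List.replicate mutations.length 0)

theorem pvFilterRange (m cnt : Nat) (h : m ≤ cnt) :
    (List.range cnt).filter (fun k => decide (k < m)) = List.range m := by
  induction cnt with
  | zero =>
    have hm : m = 0 := by omega
    subst hm; simp
  | succ c ih =>
    by_cases hm : m = c + 1
    · subst hm
      rw [List.filter_eq_self.mpr]
      intro a ha
      simp only [List.mem_range] at ha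
      simp [ha]
    · rw [List.range_succ, List.filter_append, ih (by omega)]
      have : ¬ c < m := by omega
      simp [this]

theorem pvA_eq_spec (mutations : List String) (parsed : List (List (String × List (String × Int)))) (nsteps : Int) (h : 0 < nsteps) :
    bucket_mutation_counts mutations parsed nsteps = pvSpecForm mutations parsed nsteps.toNat := by
  unfold bucket_mutation_counts
  have hn0 : 0 < nsteps.toNat := by omega
  have hs : ((nsteps.toNat : Int)) = nsteps := Int.toNat_of_nonneg (by omega)
  -- step 1: turn the skip-if into a keep-if over the named bucket body
  rw [PySem.List.foldl_congr_mem (PySem.List.pyRange 0 parsed.length nsteps) _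
    (fun res i => if (decide (i + nsteps ≤ (parsed.length : Int))) = true
      then res ++ [pvBucketA mutations parsed nsteps i] else res) []
    (by
      intro acc x _
      simp only [decide_eq_true_eq]
      by_cases hx : (parsed.length : Int) < x + nsteps
      · rw [if_pos hx, if_neg (by omega)]
      · rw [if_neg hx, if_pos (by omega)]
        rfl)]
  -- step 2: the keep-if foldl is filter-then-map
  rw [PySem.List.foldl_append_if (fun i => decide (i + nsteps ≤ (parsed.length : Int)))
    (pvBucketA mutations parsed nsteps) _ []]
  rw [List.nil_append]
  -- step 3: positive-step range as a mapped List.range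
  rw [PySem.List.pyRange_of_pos 0 (parsed.length : Int) h]
  simp only [zero_add, Int.sub_zero]
  rw [List.filter_map, List.map_map]
  -- step 4: the filter keeps exactly the first len/n indices
  have key : ∀ k : Nat,
      ((fun i => decide (i + nsteps ≤ (parsed.length : Int))) ∘ (fun k : Nat => nsteps * (k : Int))) k
        = decide (k < parsed.length / nsteps.toNat) := by
    intro k
    simp only [Function.comp_apply]
    rw [decide_eq_decide]
    have hcast : nsteps * (k : Int) + nsteps = ((k * nsteps.toNat + nsteps.toNat : Nat) : Int) := by
      push_cast [hs]; ring
    rw [hcast, Int.ofNat_le, Nat.lt_iff_add_one_le, Nat.le_div_iff_mul_le hn0, Nat.add_mul, Nat.one_mul]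
  rw [List.filter_congr (fun k _ => key k)]
  have hcnt : parsed.length / nsteps.toNat ≤
      (if (0 : Int) < (parsed.length : Int) then (((parsed.length : Int) + nsteps - 1) / nsteps).toNat else 0) := by
    by_cases hL0 : (0 : Int) < (parsed.length : Int)
    · rw [if_pos hL0]
      have h1 : ((parsed.length : Int)) / nsteps ≤ ((parsed.length : Int) + nsteps - 1) / nsteps :=
        Int.ediv_le_ediv h (by omega)
      have h2 : ((parsed.length / nsteps.toNat : Nat) : Int) = (parsed.length : Int) / nsteps := by
        rw [Int.natCast_ediv]; rw [hs]
      omega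
    · rw [if_neg hL0]
      have : parsed.length = 0 := by omega
      simp [this]
  rw [pvFilterRange _ _ hcnt]
  -- step 5: each kept bucket is the corresponding chunk sum
  unfold pvSpecForm
  apply List.map_congr_left
  intro k _
  simp only [Function.comp_apply]
  have hi : nsteps * (k : Int) = ((k * nsteps.toNat : Nat) : Int) := by push_cast [hs]; ring
  unfold pvBucketA
  rw [hi, ← hs, PySem.List.slice_natCast_add]
  rfl

theorem pvA_nonpos (mutations : List String) (parsed : List (List (String × List (String × Int)))) (nsteps : Int) (h : nsteps ≤ 0) :
    bucket_mutation_counts mutations parsed nsteps = [] := by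
  unfold bucket_mutation_counts
  have hr : PySem.List.pyRange 0 parsed.length nsteps = [] := by
    unfold PySem.List.pyRange
    by_cases h0 : nsteps = 0
    · simp [h0]
    · rw [if_neg h0, if_neg (by omega), if_neg (by omega)]
      simp
  rw [hr]
  rfl

-- ===== VERDICT (by name: the statement is the Claim_ definition above) =====
theorem bucket_mutation_counts_spec : Claim_equal_bucket_mutation_counts := by
  intro mutations parsed nsteps _ _
  unfold Spec_bucket_mutation_counts
  by_cases h : nsteps ≤ 0
  · rw [pvA_nonpos mutations parsed nsteps h]
    unfold bucket_mutation_counts_alt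
    rw [if_pos h]
  · rw [pvA_eq_spec mutations parsed nsteps (by omega), pvB_eq_spec mutations parsed nsteps (by omega)]
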